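-- pv_equiv track=rewrite | github.com/boyswithoutsockson/eduri | pipes/board_proposal_pipe_2.py | render_parts
-- ===== SOURCE A (Python) =====
-- from typing import List, Tuple, Iterable, Optional
--
-- def render_parts(parts: List[Tuple[str, str, Optional[int]]]) -> str:
--     out_blocks: List[str] = []
--     i = 0
--     while i < len(parts):
--         typ, content, *rest = parts[i]
--         level = rest[0] if rest else None
--         if typ == "list_item":
--             j = i
--             list_lines: List[str] = []
--             while j < len(parts) and parts[j][0] == "list_item":
--                 _, cont, lvl = parts[j]
--                 lvl = lvl or 1
--                 indent = " " * ((lvl - 1) * 4)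
--                 list_lines.append(f"{indent}1. {cont}")
--                 j += 1
--             out_blocks.append("\n".join(list_lines))
--             i = j
--         else:
--             out_blocks.append(content)
--             i += 1
--     return "\n\n".join([b for b in out_blocks if b and b.strip()]).strip()
-- ===== SOURCE B (Python) =====
-- from typing import List, Tuple, Optional
--
-- def render_parts(parts: List[Tuple[str, str, Optional[int]]]) -> str:
--     # Build the blocks back-to-front: walk the parts in reverse, and when a
--     # list item meets a list block at the front of the accumulator, merge into it.
--     blocks: List[Tuple[bool, str]] = []
--     for typ, cont, *rest in reversed(parts):
--         if typ == "list_item":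
--             lvl = (rest[0] if rest else None) or 1
--             line = " " * ((lvl - 1) * 4) + "1. " + cont
--             if blocks and blocks[0][0]:
--                 blocks[0] = (True, line + "\n" + blocks[0][1])
--             else:
--                 blocks.insert(0, (True, line))
--         else:
--             blocks.insert(0, (False, cont))
--     return "\n\n".join(b for _, b in blocks if b and b.strip()).strip()
-- ===== Notes on version B (the rewrite author's own statement) =====
-- stated objective: alternative
-- what changed: Replaces A's forward shared-index nested while loops (which scan ahead to collect each run of list items) with a single reverse traversal that builds the block list back-to-front, merging each list line into an adjacent list block at the front of the accumulator.
import Mathlib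
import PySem

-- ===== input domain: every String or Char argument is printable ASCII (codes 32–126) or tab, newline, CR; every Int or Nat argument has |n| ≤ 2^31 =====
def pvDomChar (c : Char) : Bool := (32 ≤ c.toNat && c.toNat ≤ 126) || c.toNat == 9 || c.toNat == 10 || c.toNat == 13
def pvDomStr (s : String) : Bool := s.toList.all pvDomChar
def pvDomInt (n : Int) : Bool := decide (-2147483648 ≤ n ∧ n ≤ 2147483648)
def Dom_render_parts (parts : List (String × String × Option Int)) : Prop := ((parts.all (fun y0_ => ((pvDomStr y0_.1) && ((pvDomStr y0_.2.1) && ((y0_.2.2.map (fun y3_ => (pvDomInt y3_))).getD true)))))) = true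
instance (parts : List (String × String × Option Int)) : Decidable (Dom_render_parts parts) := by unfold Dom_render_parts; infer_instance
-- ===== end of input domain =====

-- B replaces A's forward shared-index nested while loops by a single reverse
-- traversal that builds the block list back-to-front, merging each list line
-- into an adjacent list block at the front of the accumulator; objective: alternative.

-- ===== PORT A =====

-- f"{indent}1. {cont}" with indent = " " * (((lvl or 1) - 1) * 4)
def pvLine (p : String × String × Option Int) : String :=
  let lvl : Int := match p.2.2 with | none => 1 | some v => if v = 0 then 1 else v
  String.ofList (List.replicate ((lvl - 1) * 4).toNat ' ') ++ "1. " ++ p.2.1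

-- inner 'while j < len(parts) and parts[j][0] == "list_item"' collecting list_lines
def pvInnerA : List (String × String × Option Int) →
    List String × List (String × String × Option Int)
  | [] => ([], [])
  | p :: rest =>
    if p.1 == "list_item" then
      ((pvLine p) :: (pvInnerA rest).1, (pvInnerA rest).2)
    else ([], p :: rest)

theorem pvInnerA_len_le (l : List (String × String × Option Int)) :
    (pvInnerA l).2.length ≤ l.length := by
  induction l with
  | nil => simp [pvInnerA]
  | cons p rest ih =>
    simp only [pvInnerA]
    split
    · exact Nat.le_succ_of_le ih
    · simp

-- outer 'while i < len(parts)' building out_blocks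
def pvOuterA : List (String × String × Option Int) → List String
  | [] => []
  | p :: rest =>
    if p.1 == "list_item" then
      (PySem.Str.join "\n" (pvLine p :: (pvInnerA rest).1)) :: pvOuterA (pvInnerA rest).2
    else p.2.1 :: pvOuterA rest
termination_by l => l.length
decreasing_by
  · exact Nat.lt_succ_of_le (pvInnerA_len_le rest)
  · simp

def render_parts (parts : List (String × String × Option Int)) : String :=
  PySem.Str.strip (PySem.Str.join "\n\n"
    ((pvOuterA parts).filter (fun b => !(b == "") && !(PySem.Str.strip b == ""))))

-- ===== PORT B =====

-- one step of the reverse for-loop: prepend to the accumulator, merging a list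
-- line into a list block sitting at the front of 'blocks'
def pvStepB (p : String × String × Option Int) (blocks : List (Bool × String)) :
    List (Bool × String) :=
  if p.1 == "list_item" then
    match blocks with
    | (true, s) :: t => (true, pvLine p ++ "\n" ++ s) :: t
    | _ => (true, pvLine p) :: blocks
  else (false, p.2.1) :: blocks

def render_parts_alt (parts : List (String × String × Option Int)) : String :=
  let blocks := parts.foldr pvStepB []
  PySem.Str.strip (PySem.Str.join "\n\n"
    ((blocks.map (·.2)).filter (fun b => !(b == "") && !(PySem.Str.strip b == ""))))

-- ===== PRECONDITION & SPEC =====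
def Spec_render_parts (parts : List (String × String × Option Int)) (out : String) : Prop := out = render_parts_alt parts
instance (parts : List (String × String × Option Int)) (out : String) : Decidable (Spec_render_parts parts out) := by unfold Spec_render_parts; infer_instance

-- ===== CLAIM (what is proved, stated in full; the proofs are below) =====
def Claim_equal_render_parts : Prop := ∀ (parts : List (String × String × Option Int)), Dom_render_parts parts → Spec_render_parts parts (render_parts parts)

-- ===== LEMMAS AND PROOFS =====

theorem pvJoin_singleton (x : String) : PySem.Str.join "\n" [x] = x := by
  apply String.toList_inj.mp
  simp [PySem.Str.toList_join, PySem.Chars.join_singleton]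

theorem pvJoin_cons (x y : String) (r : List String) :
    PySem.Str.join "\n" (x :: y :: r) = x ++ "\n" ++ PySem.Str.join "\n" (y :: r) := by
  apply String.toList_inj.mp
  simp [PySem.Str.toList_join, PySem.Chars.join_cons_cons]

theorem pvInnerA_eq (l : List (String × String × Option Int)) :
    pvInnerA l = ((l.takeWhile (fun q => q.1 == "list_item")).map pvLine,
                  l.dropWhile (fun q => q.1 == "list_item")) := by
  induction l with
  | nil => simp [pvInnerA]
  | cons p rest ih =>
    simp only [pvInnerA, List.takeWhile, List.dropWhile]
    cases h : (p.1 == "list_item") with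
    | true => simp [ih]
    | false => simp

-- a maximal run of list items folds to one merged list block
theorem pvFoldB_run (rest : List (String × String × Option Int)) :
    ∀ (p : String × String × Option Int), p.1 == "list_item" →
    (p :: rest).foldr pvStepB [] =
      (true, PySem.Str.join "\n"
          (pvLine p :: (rest.takeWhile (fun q => q.1 == "list_item")).map pvLine)) ::
        (rest.dropWhile (fun q => q.1 == "list_item")).foldr pvStepB [] := by
  induction rest with
  | nil => intro p hp; simp [pvStepB, hp, pvJoin_singleton]
  | cons q r ih =>
    intro p hp
    cases hq : (q.1 == "list_item") with
    | true =>
      simp only [List.foldr_cons] at ih ⊢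
      have hq' := ih q hq
      rw [hq', pvStepB, if_pos hp]
      simp only [List.takeWhile_cons, List.dropWhile_cons, hq, if_true]
      rw [List.map_cons, pvJoin_cons]
    | false =>
      simp only [List.foldr_cons]
      rw [show pvStepB q (r.foldr pvStepB []) =
        (false, q.2.1) :: r.foldr pvStepB [] by simp [pvStepB, hq]]
      simp [pvStepB, hp, hq, pvJoin_singleton]

theorem pvOuterA_eq_foldB : ∀ (n : Nat) (l : List (String × String × Option Int)),
    l.length ≤ n → pvOuterA l = (l.foldr pvStepB []).map (·.2) := by
  intro n
  induction n with
  | zero =>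
    intro l hl
    have : l = [] := List.eq_nil_of_length_eq_zero (Nat.le_zero.mp hl)
    subst this
    simp [pvOuterA]
  | succ n ih =>
    intro l hl
    cases l with
    | nil => simp [pvOuterA]
    | cons p rest =>
      cases h : (p.1 == "list_item") with
      | true =>
        rw [pvOuterA, if_pos (by simp [h]), pvInnerA_eq, pvFoldB_run rest p h]
        simp only [List.map_cons]
        rw [ih _ (le_trans (List.length_dropWhile_le _ _) (by simpa using hl))]
      | false =>
        rw [pvOuterA, if_neg (by simp [h])]
        simp only [List.foldr_cons]
        rw [show pvStepB p (rest.foldr pvStepB []) =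
          (false, p.2.1) :: rest.foldr pvStepB [] by simp [pvStepB, h]]
        rw [ih rest (Nat.le_of_succ_le_succ hl)]
        simp

-- ===== VERDICT (by name: the statement is the Claim_ definition above) =====
theorem render_parts_spec : Claim_equal_render_parts := by
  intro parts _
  unfold Spec_render_parts render_parts render_parts_alt
  rw [pvOuterA_eq_foldB parts.length parts (le_refl _)]
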